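-- pv_equiv track=rewrite | github.com/MayurNandanwar/DSS | Python/patterns_code.py | zero_one_alter
-- ===== SOURCE A (Python) =====
-- def zero_one_alter(n):
--
--     lst = []
--     for i in range(1,n+1):# 3
--         if i%2==0:
--             x='0'
--             for i in range(1,i): # 1 2
--                 if i%2!=0:
--                     x+='1'
--                 else:
--                     x+='0'
--             lst.append(x)
--         else:
--             x = '1'
--             for i in range(1,i): # 1 2 3
--                 if i%2!=0:
--                     x+='0'
--                 else:
--                     x+='1'
--             lst.append(x)
--     return '\n'.join(lst)
-- ===== SOURCE B (Python) =====
-- def zero_one_alter(n):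
--     if n <= 0:
--         return ""
--     base1 = ("10" * n)[:n]   # rows starting with '1' (odd rows)
--     base0 = ("01" * n)[:n]   # rows starting with '0' (even rows)
--     return "\n".join((base1 if i % 2 != 0 else base0)[:i] for i in range(1, n + 1))
-- ===== Notes on version B (the rewrite author's own statement) =====
-- stated objective: simpler
-- what changed: Replaced the nested parity-branch character loop with two precomputed alternating base strings of length n, each row taken as a prefix slice of the matching base and joined once.
import Mathlib
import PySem

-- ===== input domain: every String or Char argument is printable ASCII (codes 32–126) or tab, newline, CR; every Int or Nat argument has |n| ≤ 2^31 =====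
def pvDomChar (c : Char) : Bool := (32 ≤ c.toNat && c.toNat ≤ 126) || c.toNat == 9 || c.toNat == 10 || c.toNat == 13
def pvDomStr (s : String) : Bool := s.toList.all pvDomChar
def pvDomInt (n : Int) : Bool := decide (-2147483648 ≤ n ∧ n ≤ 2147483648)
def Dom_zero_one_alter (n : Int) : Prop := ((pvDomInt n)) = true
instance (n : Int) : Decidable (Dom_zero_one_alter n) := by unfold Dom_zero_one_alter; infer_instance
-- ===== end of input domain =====

-- B replaces A's nested parity-branch character loop by prefix slices of two precomputed
-- alternating base strings, joined once (simpler decomposition, same output).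

-- ===== PORT A =====
def zero_one_alter (n : Int) : String :=
  let lst : List (List Char) :=
    (PySem.List.pyRange 1 (n+1) 1).foldl (fun lst i =>
      if PySem.Int.mod i 2 = 0 then
        let x := (PySem.List.pyRange 1 i 1).foldl (fun x j =>
          if PySem.Int.mod j 2 ≠ 0 then x ++ ['1'] else x ++ ['0']) ['0']
        lst ++ [x]
      else
        let x := (PySem.List.pyRange 1 i 1).foldl (fun x j =>
          if PySem.Int.mod j 2 ≠ 0 then x ++ ['0'] else x ++ ['1']) ['1']
        lst ++ [x]) []
  String.ofList (PySem.Chars.join ['\n'] lst)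

-- ===== PORT B =====
-- Python string repetition cs * n, ported by hand (exact for the n ≥ 1 at which B uses it)
def pvRepeat (cs : List Char) (n : Int) : List Char :=
  (List.replicate n.toNat cs).flatten

def zero_one_alter_alt (n : Int) : String :=
  if n ≤ 0 then "" else
    let base1 := PySem.List.slice (pvRepeat ['1', '0'] n) none (some n)
    let base0 := PySem.List.slice (pvRepeat ['0', '1'] n) none (some n)
    String.ofList (PySem.Chars.join ['\n']
      ((PySem.List.pyRange 1 (n+1) 1).map (fun i =>
        PySem.List.slice (if PySem.Int.mod i 2 ≠ 0 then base1 else base0) none (some i))))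

-- ===== PRECONDITION & SPEC =====
def Spec_zero_one_alter (n : Int) (out : String) : Prop := out = zero_one_alter_alt n
instance (n : Int) (out : String) : Decidable (Spec_zero_one_alter n out) := by unfold Spec_zero_one_alter; infer_instance

-- ===== CLAIM (what is proved, stated in full; the proofs are below) =====
def Claim_equal_zero_one_alter : Prop := ∀ (n : Int), Dom_zero_one_alter n → Spec_zero_one_alter n (zero_one_alter n)

-- ===== LEMMAS AND PROOFS =====

-- the alternating string c d c d … of length k
def pvAlt (c d : Char) : Nat → List Char
  | 0 => []
  | k+1 => c :: pvAlt d c k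

theorem pvAlt_snoc (c d : Char) (m : Nat) :
    pvAlt c d (m+1) = pvAlt c d m ++ [if m % 2 = 0 then c else d] := by
  induction m generalizing c d with
  | zero => simp [pvAlt]
  | succ k ih =>
    rw [show k + 1 + 1 = (k+1) + 1 from rfl, pvAlt, ih, pvAlt]
    rcases Nat.mod_two_eq_zero_or_one k with h | h <;>
      simp [Nat.add_mod, h]

-- A's inner comparison 'j % 2 != 0' mapped over range(1, m+1)
theorem pvMap_range (a b : Char) (m : Nat) :
    (PySem.List.pyRange 1 ((m:Int)+1) 1).map
      (fun j => if PySem.Int.mod j 2 ≠ 0 then a else b) = pvAlt a b m := by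
  induction m with
  | zero => rw [PySem.List.pyRange_one_eq_nil (by omega)]; rfl
  | succ k ih =>
    rw [show ((k+1:Nat):Int)+1 = ((k:Int)+1)+1 by push_cast; ring,
        PySem.List.pyRange_one_succ_right (by omega), List.map_append, ih, pvAlt_snoc]
    have hm : PySem.Int.mod ((k:Int)+1) 2 = (((k+1) % 2 : Nat) : Int) := by
      exact_mod_cast PySem.Int.mod_natCast (k+1) 2
    simp only [List.map_cons, List.map_nil]
    rw [hm]
    rcases Nat.mod_two_eq_zero_or_one k with h | h
    · have h1 : (k+1) % 2 = 1 := by omega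
      simp [h, h1]
    · have h1 : (k+1) % 2 = 0 := by omega
      simp [h, h1]

theorem pvFlatten_repl (c d : Char) (m : Nat) :
    (List.replicate m [c, d]).flatten = pvAlt c d (2*m) := by
  induction m with
  | zero => rfl
  | succ k ih =>
    rw [List.replicate_succ, List.flatten_cons, ih,
        show 2*(k+1) = (2*k+1)+1 by omega, pvAlt, pvAlt]
    rfl

theorem pvTake_alt (c d : Char) (k m : Nat) :
    (pvAlt c d m).take k = pvAlt c d (min k m) := by
  induction k generalizing c d m with
  | zero => simp [pvAlt]
  | succ j ih =>
    cases m with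
    | zero => simp [pvAlt]
    | succ m' => simp [pvAlt, ih, Nat.succ_min_succ]

-- A's inner loop builds exactly the alternating row of length i
theorem pvRowA (a b : Char) (i : Int) (hi : 1 ≤ i) :
    (PySem.List.pyRange 1 i 1).foldl
      (fun x j => if PySem.Int.mod j 2 ≠ 0 then x ++ [b] else x ++ [a]) [a]
      = pvAlt a b i.toNat := by
  obtain ⟨m, hm⟩ : ∃ m : Nat, i = (m:Int) + 1 :=
    ⟨(i-1).toNat, by omega⟩
  subst hm
  have hfun : (fun (x : List Char) (j : Int) =>
      if PySem.Int.mod j 2 ≠ 0 then x ++ [b] else x ++ [a])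
      = fun x j => x ++ [if PySem.Int.mod j 2 ≠ 0 then b else a] := by
    funext x j; split <;> rfl
  rw [hfun, PySem.List.foldl_append_singleton_eq_map, pvMap_range b a m,
      show ((m:Int)+1).toNat = m+1 by omega, pvAlt]
  rfl

-- B's prefix slice of a base string yields the same alternating row
theorem pvRowB (a b : Char) (n i : Int) (h1 : 1 ≤ i) (h2 : i ≤ n) :
    PySem.List.slice (PySem.List.slice (pvRepeat [a, b] n) none (some n)) none (some i)
      = pvAlt a b i.toNat := by
  rw [PySem.List.slice_to _ (by omega), PySem.List.slice_to _ (by omega),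
      pvRepeat, pvFlatten_repl, pvTake_alt, pvTake_alt]
  congr 1
  omega

-- ===== VERDICT (by name: the statement is the Claim_ definition above) =====
theorem zero_one_alter_spec : Claim_equal_zero_one_alter := by
  intro n _
  show zero_one_alter n = zero_one_alter_alt n
  unfold zero_one_alter zero_one_alter_alt
  by_cases hn : n ≤ 0
  · rw [PySem.List.pyRange_one_eq_nil (by omega), if_pos hn]
    rfl
  · simp only [hn, if_false]
    replace hn : 0 < n := by omega
    congr 1
    congr 1
    have hfun : (fun (lst : List (List Char)) (i : Int) =>
        if PySem.Int.mod i 2 = 0 then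
          let x := (PySem.List.pyRange 1 i 1).foldl (fun x j =>
            if PySem.Int.mod j 2 ≠ 0 then x ++ ['1'] else x ++ ['0']) ['0']
          lst ++ [x]
        else
          let x := (PySem.List.pyRange 1 i 1).foldl (fun x j =>
            if PySem.Int.mod j 2 ≠ 0 then x ++ ['0'] else x ++ ['1']) ['1']
          lst ++ [x])
        = fun lst i => lst ++ [if PySem.Int.mod i 2 = 0 then
            (PySem.List.pyRange 1 i 1).foldl (fun x j =>
              if PySem.Int.mod j 2 ≠ 0 then x ++ ['1'] else x ++ ['0']) ['0']
          else
            (PySem.List.pyRange 1 i 1).foldl (fun x j =>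
              if PySem.Int.mod j 2 ≠ 0 then x ++ ['0'] else x ++ ['1']) ['1'] ] := by
      funext lst i; split <;> rfl
    rw [hfun, PySem.List.foldl_append_singleton_eq_map, List.nil_append]
    apply List.map_congr_left
    intro i hi
    rw [PySem.List.mem_pyRange_one] at hi
    by_cases hpar : PySem.Int.mod i 2 = 0
    · rw [if_pos hpar, if_neg (not_not_intro hpar),
          pvRowA '0' '1' i hi.1, pvRowB '0' '1' n i hi.1 (by omega)]
    · rw [if_neg hpar, if_pos hpar,
          pvRowA '1' '0' i hi.1, pvRowB '1' '0' n i hi.1 (by omega)]
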